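-- pv_equiv track=rewrite | github.com/kevinyang372/Nim | solution_search.py | find_next
-- ===== SOURCE A (Python) =====
-- def find_next(state):
--     visited = set()
--     res = []
--
--     for i in range(len(state)):
--         for m in range(1, state[i] + 1):
--             temp = list(state[:])
--             temp[i] -= m
--
--             # check if the stage already exists
--             rearranged = tuple(sorted(temp))
--             if rearranged not in visited:
--                 res.append(temp)
--                 visited.add(rearranged)
--
--     return res
-- ===== SOURCE B (Python) =====
-- def find_next(state):
--     # Dedup by pile VALUE: two next-states have the same sorted arrangement
--     # iff they come from equal-valued piles with the same removal amount,
--     # so skipping any pile whose value was already handled reproduces A's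
--     # output list exactly (lowest index first), without sorting each candidate.
--     seen = set()
--     res = []
--     for i in range(len(state)):
--         v = state[i]
--         if v in seen:
--             continue
--         seen.add(v)
--         for m in range(1, v + 1):
--             nxt = state[:]
--             nxt[i] = v - m
--             res.append(nxt)
--     return res
-- ===== Notes on version B (the rewrite author's own statement) =====
-- stated objective: faster
-- what changed: Instead of sorting every candidate state and deduplicating by its sorted tuple, B keeps a set of pile values already handled and skips a whole pile when its value repeats, since duplicate sorted states arise exactly from equal-valued piles with the same removal amount.
import Mathlib
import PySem

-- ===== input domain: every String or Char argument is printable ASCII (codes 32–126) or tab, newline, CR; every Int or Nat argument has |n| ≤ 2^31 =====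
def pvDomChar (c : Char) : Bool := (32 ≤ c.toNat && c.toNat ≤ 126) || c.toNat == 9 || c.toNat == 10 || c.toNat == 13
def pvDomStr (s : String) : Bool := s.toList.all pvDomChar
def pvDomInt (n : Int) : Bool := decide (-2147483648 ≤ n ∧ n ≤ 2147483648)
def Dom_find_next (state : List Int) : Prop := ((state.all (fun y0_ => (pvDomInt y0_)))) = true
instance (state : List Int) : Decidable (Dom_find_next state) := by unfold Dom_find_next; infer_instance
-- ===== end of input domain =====

-- B dedups by pile VALUE (one membership test per pile) instead of sorting every
-- candidate state and dedup-ing by sorted tuple; same output list, in the same order.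


-- ===== PORT A =====
-- inner loop body of A: for m in range(1, state[i]+1): temp = state[:]; temp[i] -= m; …
def astep (state : List Int) (i : Int)
    (acc : PySem.Set (List Int) × List (List Int)) (m : Int) :
    PySem.Set (List Int) × List (List Int) :=
  let temp := PySem.List.pySetD state i (PySem.List.pyGetD state i 0 - m)
  let rearranged := PySem.List.sorted temp (fun x => x) false
  if acc.1.contains rearranged then acc
  else (acc.1.add rearranged, acc.2 ++ [temp])

-- outer loop body of A: one pile i
def abody (state : List Int)
    (acc : PySem.Set (List Int) × List (List Int)) (i : Int) :
    PySem.Set (List Int) × List (List Int) :=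
  (PySem.List.pyRange 1 (PySem.List.pyGetD state i 0 + 1)).foldl (astep state i) acc

def find_next (state : List Int) : List (List Int) :=
  ((PySem.List.pyRange 0 (state.length : Int)).foldl (abody state)
    (PySem.Set.empty, [])).2

-- ===== PORT B =====
-- loop body of B: skip pile i entirely if its value was seen, else emit all its moves
def bbody (state : List Int)
    (acc : PySem.Set Int × List (List Int)) (i : Int) :
    PySem.Set Int × List (List Int) :=
  let v := PySem.List.pyGetD state i 0
  if acc.1.contains v then acc
  else (acc.1.add v,
    (PySem.List.pyRange 1 (v + 1)).foldl
      (fun r m => r ++ [PySem.List.pySetD state i (v - m)]) acc.2)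

def find_next_alt (state : List Int) : List (List Int) :=
  ((PySem.List.pyRange 0 (state.length : Int)).foldl (bbody state)
    (PySem.Set.empty, [])).2

-- ===== PRECONDITION & SPEC =====
def Spec_find_next (state : List Int) (out : List (List Int)) : Prop := out = find_next_alt state
instance (state : List Int) (out : List (List Int)) : Decidable (Spec_find_next state out) := by unfold Spec_find_next; infer_instance

-- ===== CLAIM (what is proved, stated in full; the proofs are below) =====
def Claim_equal_find_next : Prop := ∀ (state : List Int), Dom_find_next state → Spec_find_next state (find_next state)

-- ===== LEMMAS AND PROOFS =====

-- the candidate state obtained by removing m from pile i, and its sorted key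
def tmpC (state : List Int) (i : Nat) (m : Int) : List Int :=
  state.set i (state.getD i 0 - m)
def scC (state : List Int) (i : Nat) (m : Int) : List Int :=
  PySem.List.sorted (tmpC state i m) (fun x => x) false

-- invariants after the first i piles
def invV (state : List Int) (i : Nat) (V : PySem.Set (List Int)) : Prop :=
  ∀ t, t ∈ V ↔ ∃ j : Nat, j < i ∧ ∃ m : Int, 1 ≤ m ∧ m ≤ state.getD j 0 ∧ t = scC state j m
def invW (state : List Int) (i : Nat) (W : PySem.Set Int) : Prop :=
  ∀ v, v ∈ W ↔ ∃ j : Nat, j < i ∧ state.getD j 0 = v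

-- counting: setting one in-range position changes exactly that occurrence
lemma set_perm_iff (l : List Int) (i j : Nat) (hi : i < l.length) (hj : j < l.length)
    (a b : Int) (ha : a ≠ l[i]) (hb : b ≠ l[j]) :
    (l.set i a).Perm (l.set j b) ↔ (l[i] = l[j] ∧ a = b) := by
  constructor
  · intro h
    rw [List.perm_iff_count] at h
    have hposi : 0 < List.count l[i] l := List.count_pos_iff.mpr (l.getElem_mem hi)
    have hposj : 0 < List.count l[j] l := List.count_pos_iff.mpr (l.getElem_mem hj)
    have key : l[i] = l[j] := by
      by_contra hne
      have h1 := h l[i]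
      rw [List.count_set hi, List.count_set hj] at h1
      simp only [beq_iff_eq] at h1
      split_ifs at h1 <;> omega
    refine ⟨key, ?_⟩
    by_contra hab
    have h2 := h a
    rw [List.count_set hi, List.count_set hj] at h2
    simp only [beq_iff_eq] at h2
    split_ifs at h2 <;> omega
  · rintro ⟨h1, h2⟩
    subst h2
    rw [List.perm_iff_count]
    intro v
    rw [List.count_set hi, List.count_set hj, h1]

-- separation: two candidates share a sorted key iff same pile value and same removal
lemma sc_eq_iff (state : List Int) (i j : Nat) (hi : i < state.length) (hj : j < state.length)
    (m k : Int) (hm : 1 ≤ m) (hk : 1 ≤ k) :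
    scC state i m = scC state j k ↔ (state.getD i 0 = state.getD j 0 ∧ m = k) := by
  have hgi : state.getD i 0 = state[i] := List.getD_eq_getElem state 0 hi
  have hgj : state.getD j 0 = state[j] := List.getD_eq_getElem state 0 hj
  rw [scC, scC, PySem.List.sorted_id_eq_sorted_id_iff_perm, tmpC, tmpC,
    set_perm_iff state i j hi hj _ _ (by omega) (by omega)]
  constructor
  · rintro ⟨h1, h2⟩; constructor <;> omega
  · rintro ⟨h1, h2⟩; constructor <;> omega

lemma astep_eq (state : List Int) (i : Nat) (acc : PySem.Set (List Int) × List (List Int)) (m : Int) :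
    astep state (i : Int) acc m =
      if acc.1.contains (scC state i m) then acc
      else (acc.1.add (scC state i m), acc.2 ++ [tmpC state i m]) := by
  simp [astep, scC, tmpC, PySem.List.pySetD_natCast, PySem.List.pyGetD_natCast]

lemma inner_skip (state : List Int) (i : Nat) (ms : List Int)
    (V : PySem.Set (List Int)) (R : List (List Int))
    (h : ∀ m ∈ ms, scC state i m ∈ V) :
    ms.foldl (astep state (i : Int)) (V, R) = (V, R) := by
  induction ms with
  | nil => rfl
  | cons m ms ih =>
    rw [List.foldl_cons, astep_eq,
      if_pos (PySem.Set.contains_iff V _ |>.mpr (h m List.mem_cons_self))]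
    exact ih (fun m' hm' => h m' (List.mem_cons_of_mem _ hm'))

lemma inner_fresh (state : List Int) (i : Nat) (ms : List Int)
    (V : PySem.Set (List Int)) (R : List (List Int))
    (hfresh : ∀ m ∈ ms, scC state i m ∉ V)
    (hnodup : (ms.map (scC state i)).Nodup) :
    ms.foldl (astep state (i : Int)) (V, R)
      = (V ++ ms.map (scC state i), R ++ ms.map (tmpC state i)) := by
  induction ms generalizing V R with
  | nil => simp
  | cons m ms ih =>
    rw [List.foldl_cons, astep_eq, if_neg]
    · have hadd : V.add (scC state i m) = V ++ [scC state i m] := by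
        rw [PySem.Set.add, if_neg]
        simp only [PySem.Set.contains]
        intro hc
        exact hfresh m List.mem_cons_self (by simpa using hc)
      rw [hadd]
      rw [ih (V ++ [scC state i m]) (R ++ [tmpC state i m]) ?_ ?_]
      · simp
      · intro m' hm'
        simp only [List.mem_append, List.mem_singleton]
        rintro (hin | heq)
        · exact hfresh m' (List.mem_cons_of_mem _ hm') hin
        · simp only [List.map_cons, List.nodup_cons] at hnodup
          exact hnodup.1 (heq ▸ List.mem_map_of_mem hm')
      · simp only [List.map_cons, List.nodup_cons] at hnodup
        exact hnodup.2
    · intro hc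
      exact hfresh m List.mem_cons_self ((PySem.Set.contains_iff V _).mp hc)

lemma bbody_eq (state : List Int) (i : Nat) (W : PySem.Set Int) (R : List (List Int)) :
    bbody state (W, R) (i : Int) =
      if W.contains (state.getD i 0) then (W, R)
      else (W.add (state.getD i 0),
        R ++ (PySem.List.pyRange 1 (state.getD i 0 + 1)).map (tmpC state i)) := by
  simp only [bbody, PySem.List.pyGetD_natCast,
    PySem.List.pySetD_natCast]
  rw [PySem.List.foldl_append_singleton_eq_map (fun m => state.set i (state.getD i 0 - m))]
  rfl

lemma step_case (state : List Int) (i : Nat) (hi : i < state.length)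
    (V : PySem.Set (List Int)) (W : PySem.Set Int) (R : List (List Int))
    (hV : invV state i V) (hW : invW state i W) :
    ∃ V' W' D, abody state (V, R) (i : Int) = (V', R ++ D) ∧
      bbody state (W, R) (i : Int) = (W', R ++ D) ∧
      invV state (i + 1) V' ∧ invW state (i + 1) W' := by
  have habody : abody state (V, R) (i : Int)
      = (PySem.List.pyRange 1 (state.getD i 0 + 1)).foldl (astep state (i : Int)) (V, R) := by
    simp [abody, PySem.List.pyGetD_natCast]
  by_cases hc : state.getD i 0 ∈ W
  · -- pile value already seen: both sides do nothing
    obtain ⟨j0, hj0i, hj0v⟩ := (hW _).mp hc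
    refine ⟨V, W, [], ?_, ?_, ?_, ?_⟩
    · rw [habody, inner_skip]
      · simp
      · intro m hm
        rw [PySem.List.mem_pyRange_one] at hm
        have : scC state i m = scC state j0 m :=
          (sc_eq_iff state i j0 hi (by omega) m m hm.1 hm.1).mpr ⟨hj0v.symm, rfl⟩
        exact (hV _).mpr ⟨j0, hj0i, m, hm.1, by omega, this ▸ rfl⟩
    · rw [bbody_eq, if_pos ((PySem.Set.contains_iff W _).mpr hc)]; simp
    · intro t
      rw [hV t]
      constructor
      · rintro ⟨j, hj, hrest⟩; exact ⟨j, by omega, hrest⟩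
      · rintro ⟨j, hj, m, hm1, hm2, ht⟩
        rcases Nat.lt_succ_iff_lt_or_eq.mp hj with hji | rfl
        · exact ⟨j, hji, m, hm1, hm2, ht⟩
        · have : scC state j m = scC state j0 m :=
            (sc_eq_iff state j j0 hi (by omega) m m hm1 hm1).mpr ⟨hj0v.symm, rfl⟩
          exact ⟨j0, hj0i, m, hm1, by omega, by rw [ht, this]⟩
    · intro v
      rw [hW v]
      constructor
      · rintro ⟨j, hj, hrest⟩; exact ⟨j, by omega, hrest⟩
      · rintro ⟨j, hj, hv⟩
        rcases Nat.lt_succ_iff_lt_or_eq.mp hj with hji | rfl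
        · exact ⟨j, hji, hv⟩
        · exact ⟨j0, hj0i, by omega⟩
  · -- fresh pile value: both sides append the same block
    have hfresh : ∀ m ∈ PySem.List.pyRange 1 (state.getD i 0 + 1), scC state i m ∉ V := by
      intro m hm hmem
      rw [PySem.List.mem_pyRange_one] at hm
      obtain ⟨j, hji, m', hm'1, hm'2, ht⟩ := (hV _).mp hmem
      have := (sc_eq_iff state i j hi (by omega) m m' hm.1 hm'1).mp ht
      exact hc ((hW _).mpr ⟨j, hji, this.1.symm⟩)
    have hnodup : ((PySem.List.pyRange 1 (state.getD i 0 + 1)).map (scC state i)).Nodup := by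
      refine (PySem.List.nodup_pyRange_one _ _).map_on ?_
      intro m hm k hk heq
      rw [PySem.List.mem_pyRange_one] at hm hk
      exact ((sc_eq_iff state i i hi hi m k hm.1 hk.1).mp heq).2
    refine ⟨V ++ (PySem.List.pyRange 1 (state.getD i 0 + 1)).map (scC state i),
      W.add (state.getD i 0),
      (PySem.List.pyRange 1 (state.getD i 0 + 1)).map (tmpC state i), ?_, ?_, ?_, ?_⟩
    · rw [habody, inner_fresh state i _ V R hfresh hnodup]
    · rw [bbody_eq, if_neg (by simpa using fun h => hc ((PySem.Set.contains_iff W _).mp h))]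
    · intro t
      simp only [List.mem_append, List.mem_map, PySem.List.mem_pyRange_one]
      rw [hV t]
      constructor
      · rintro (⟨j, hj, hrest⟩ | ⟨m, ⟨hm1, hm2⟩, ht⟩)
        · exact ⟨j, by omega, hrest⟩
        · exact ⟨i, by omega, m, hm1, by omega, ht.symm⟩
      · rintro ⟨j, hj, m, hm1, hm2, ht⟩
        rcases Nat.lt_succ_iff_lt_or_eq.mp hj with hji | rfl
        · exact Or.inl ⟨j, hji, m, hm1, hm2, ht⟩
        · exact Or.inr ⟨m, ⟨hm1, by omega⟩, ht.symm⟩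
    · intro v
      rw [PySem.Set.mem_add, hW v]
      constructor
      · rintro (⟨j, hj, hv⟩ | rfl)
        · exact ⟨j, by omega, hv⟩
        · exact ⟨i, by omega, rfl⟩
      · rintro ⟨j, hj, hv⟩
        rcases Nat.lt_succ_iff_lt_or_eq.mp hj with hji | rfl
        · exact Or.inl ⟨j, hji, hv⟩
        · exact Or.inr hv.symm

lemma loop_eq (state : List Int) :
    ∀ (k i : Nat), i + k = state.length →
    ∀ (V : PySem.Set (List Int)) (W : PySem.Set Int) (R : List (List Int)),
    invV state i V → invW state i W →
    ((PySem.List.pyRange (i : Int) (state.length : Int)).foldl (abody state) (V, R)).2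
      = ((PySem.List.pyRange (i : Int) (state.length : Int)).foldl (bbody state) (W, R)).2 := by
  intro k
  induction k with
  | zero =>
    intro i hik V W R _ _
    rw [PySem.List.pyRange_one_eq_nil (by exact_mod_cast (by omega : state.length ≤ i))]
    rfl
  | succ k ih =>
    intro i hik V W R hV hW
    have hi : i < state.length := by omega
    rw [PySem.List.pyRange_one_cons (by exact_mod_cast hi)]
    rw [List.foldl_cons, List.foldl_cons]
    obtain ⟨V', W', D, hA, hB, hV', hW'⟩ := step_case state i hi V W R hV hW
    rw [hA, hB]
    have hcast : (i : Int) + 1 = ((i + 1 : Nat) : Int) := by push_cast; ring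
    rw [hcast]
    exact ih (i + 1) (by omega) V' W' (R ++ D) hV' hW'

-- ===== VERDICT (by name: the statement is the Claim_ definition above) =====
theorem find_next_spec : Claim_equal_find_next := by
  intro state _
  unfold Spec_find_next find_next find_next_alt
  have h := loop_eq state state.length 0 (by omega) PySem.Set.empty PySem.Set.empty []
    (by intro t; simp [PySem.Set.empty]) (by intro v; simp [PySem.Set.empty])
  simpa using h
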